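-- pv_equiv track=rewrite | github.com/vam-sin/domdet | nn_param_generator.py | make_divisor_lookup
-- ===== SOURCE A (Python) =====
-- def make_divisor_lookup(hyperparams):
--     divisor_dict = {}
--     for i, k in enumerate(hyperparams.keys()):
--         keys_after = list(hyperparams.items())[i+1:]
--         n_divisor = 1
--         for n_values in [len(item[1]) for item in keys_after]:
--             n_divisor *= n_values
--         divisor_dict[k] = n_divisor
--     return divisor_dict
-- ===== SOURCE B (Python) =====
-- def make_divisor_lookup(hyperparams):
--     # single right-to-left pass with a running suffix product, O(n)
--     out = []
--     p = 1
--     for k, v in reversed(list(hyperparams.items())):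
--         out.append((k, p))
--         p *= len(v)
--     out.reverse()
--     return dict(out)
-- ===== Notes on version B (the rewrite author's own statement) =====
-- stated objective: faster
-- what changed: replaces the per-key rebuild-and-rescan of the tail (a slice plus an inner product loop for every key) with one right-to-left pass maintaining a running suffix product
import Mathlib
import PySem

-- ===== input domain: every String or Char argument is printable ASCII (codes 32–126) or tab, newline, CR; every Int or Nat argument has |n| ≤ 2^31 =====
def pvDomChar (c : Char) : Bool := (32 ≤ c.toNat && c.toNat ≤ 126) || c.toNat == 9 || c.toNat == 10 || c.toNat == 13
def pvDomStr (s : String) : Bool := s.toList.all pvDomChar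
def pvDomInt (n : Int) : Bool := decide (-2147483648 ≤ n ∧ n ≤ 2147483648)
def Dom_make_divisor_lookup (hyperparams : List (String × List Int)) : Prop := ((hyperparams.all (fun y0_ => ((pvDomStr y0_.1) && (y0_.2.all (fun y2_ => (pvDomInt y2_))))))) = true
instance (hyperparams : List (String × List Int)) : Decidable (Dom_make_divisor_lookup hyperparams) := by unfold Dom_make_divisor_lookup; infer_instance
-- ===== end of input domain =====

-- B replaces A's per-key tail-slice-and-product rescan by one right-to-left pass with a running suffix product (O(n) instead of O(n^2)).

-- ===== PORT A =====
def make_divisor_lookup (hyperparams : List (String × List Int)) : List (String × Int) :=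
  ((PySem.List.enumerate (hyperparams.map Prod.fst) 0).foldl
    (fun divisor_dict ik =>
      -- keys_after = hyperparams[i+1:]; n_divisor = product of len(item[1]) over keys_after
      divisor_dict.insert ik.2
        (((PySem.List.slice hyperparams (some (ik.1 + 1)) none).map
            (fun item => (item.2.length : Int))).foldl (fun acc n => acc * n) 1))
    PySem.Dict.empty).items

-- ===== PORT B =====
-- right-to-left pass: returns (running suffix product, output built back-to-front)
def mdlGo : List (String × List Int) → Int × List (String × Int)
  | [] => (1, [])
  | (k, v) :: rest =>
      let pr := mdlGo rest
      (pr.1 * (v.length : Int), (k, pr.1) :: pr.2)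

def make_divisor_lookup_alt (hyperparams : List (String × List Int)) : List (String × Int) :=
  (mdlGo hyperparams).2

-- ===== PRECONDITION & SPEC =====
-- Pre_ excludes association lists with duplicate keys: the argument is a Python dict, which cannot
-- carry duplicate keys, so A's dict-overwrite behaviour there is an artefact of the list encoding.
def Pre_make_divisor_lookup (hyperparams : List (String × List Int)) : Prop :=
  (hyperparams.map Prod.fst).Nodup
instance (hyperparams : List (String × List Int)) : Decidable (Pre_make_divisor_lookup hyperparams) := by
  unfold Pre_make_divisor_lookup; infer_instance

def pvWitness_make_divisor_lookup : (List (String × List Int)) :=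
  [("a", [1, 2]), ("b", [3, 4, 5]), ("c", [6])]

def Spec_make_divisor_lookup (hyperparams : List (String × List Int)) (out : List (String × Int)) : Prop :=
  out = make_divisor_lookup_alt hyperparams
instance (hyperparams : List (String × List Int)) (out : List (String × Int)) : Decidable (Spec_make_divisor_lookup hyperparams out) := by
  unfold Spec_make_divisor_lookup; infer_instance

-- ===== CLAIM (what is proved, stated in full; the proofs are below) =====
def Claim_equal_make_divisor_lookup : Prop := ∀ (hyperparams : List (String × List Int)), Dom_make_divisor_lookup hyperparams → Pre_make_divisor_lookup hyperparams → Spec_make_divisor_lookup hyperparams (make_divisor_lookup hyperparams)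

-- ===== LEMMAS AND PROOFS =====

-- the common reference value: for each position j, (key at j, product of lengths of the lists after j)
def mdlRef (hyperparams : List (String × List Int)) : List (String × Int) :=
  (List.range hyperparams.length).map
    (fun j => ((hyperparams.map Prod.fst)[j]!,
               ((hyperparams.drop (j + 1)).map (fun it => (it.2.length : Int))).prod))

lemma mdlGo_eq (hp : List (String × List Int)) :
    mdlGo hp = ((hp.map (fun it => (it.2.length : Int))).prod, mdlRef hp) := by
  induction hp with
  | nil => simp [mdlGo, mdlRef]
  | cons h t ih =>
      obtain ⟨k, v⟩ := h
      simp only [mdlGo, ih, mdlRef, List.length_cons, List.range_succ_eq_map, List.map_cons,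
        List.map_map, List.prod_cons]
      refine congrArg₂ Prod.mk (by ring) ?_
      refine congrArg₂ List.cons (by simp) ?_
      apply List.map_congr_left
      intro j hj
      simp [Function.comp]

lemma alt_eq_ref (hp : List (String × List Int)) : make_divisor_lookup_alt hp = mdlRef hp := by
  simp [make_divisor_lookup_alt, mdlGo_eq]

lemma a_eq_ref (hp : List (String × List Int)) (hnd : (hp.map Prod.fst).Nodup) :
    make_divisor_lookup hp = mdlRef hp := by
  unfold make_divisor_lookup
  refine Eq.trans (PySem.Dict.items_foldl_insert_fresh _ _ _ _
      (by intro a _; simp [PySem.Dict.contains_empty])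
      (by rw [PySem.List.map_snd_enumerate]; exact hnd)) ?_
  simp only [PySem.Dict.empty, List.nil_append]
  apply List.ext_getElem
  · simp [mdlRef, PySem.List.length_enumerate]
  · intro j hj hj'
    have hjlen : j < hp.length := by
      simpa [PySem.List.length_enumerate] using hj
    simp only [List.getElem_map, PySem.List.getElem_enumerate, mdlRef, List.getElem_range]
    have hcast : ((0 : Int) + (j : Int)) + 1 = ((j + 1 : Nat) : Int) := by push_cast; ring
    rw [hcast, PySem.List.slice_from_natCast]
    have : ((hp.drop (j + 1)).map (fun it => ((it.2.length : Int)))).foldl (fun acc n => acc * n) 1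
        = ((hp.drop (j + 1)).map (fun it => ((it.2.length : Int)))).prod := by
      rw [List.prod_eq_foldl]
    rw [this]
    congr 1
    rw [List.getElem!_eq_getElem?_getD]
    simp [hjlen]

-- ===== VERDICT (by name: the statement is the Claim_ definition above) =====
theorem make_divisor_lookup_spec : Claim_equal_make_divisor_lookup := by
  intro hp _ hpre
  unfold Spec_make_divisor_lookup
  rw [a_eq_ref hp hpre, alt_eq_ref]
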